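-- pv_equiv track=rewrite | github.com/neardata-eu/lithops-hpc | examples/mdr/mdr_parts.py | compute_chunk_ranges_balanced
-- ===== SOURCE A (Python) =====
-- def compute_chunk_ranges_balanced(n_tasks, n_workers):
--     """Compute ranges (list indexes) to split n_tasks into n_workers.
--
--     Balanced.
--     Adapted from https://more-itertools.readthedocs.io/en/latest/_modules/more_itertools/more.html#divide
--     """
--
--     q, r = divmod(n_tasks, n_workers)
--
--     chunk_ranges = []
--     stop = 0
--     for i in range(1, n_workers + 1):
--         start = stop
--         stop += q + 1 if i <= r else q
--         chunk_ranges.append((start, stop))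
--
--     return chunk_ranges
-- ===== SOURCE B (Python) =====
-- def compute_chunk_ranges_balanced(n_tasks, n_workers):
--     """Compute ranges (list indexes) to split n_tasks into n_workers, balanced.
--
--     Each range is derived independently by a closed form instead of a running sum.
--     """
--     q, r = divmod(n_tasks, n_workers)
--     return [(i * q + min(i, r), (i + 1) * q + min(i + 1, r))
--             for i in range(n_workers)]
-- ===== Notes on version B (the rewrite author's own statement) =====
-- stated objective: simpler
-- what changed: Replaces the running-sum accumulator loop with a stateless list comprehension computing each range by the closed form (i*q + min(i, r), (i+1)*q + min(i+1, r)).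
import Mathlib
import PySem

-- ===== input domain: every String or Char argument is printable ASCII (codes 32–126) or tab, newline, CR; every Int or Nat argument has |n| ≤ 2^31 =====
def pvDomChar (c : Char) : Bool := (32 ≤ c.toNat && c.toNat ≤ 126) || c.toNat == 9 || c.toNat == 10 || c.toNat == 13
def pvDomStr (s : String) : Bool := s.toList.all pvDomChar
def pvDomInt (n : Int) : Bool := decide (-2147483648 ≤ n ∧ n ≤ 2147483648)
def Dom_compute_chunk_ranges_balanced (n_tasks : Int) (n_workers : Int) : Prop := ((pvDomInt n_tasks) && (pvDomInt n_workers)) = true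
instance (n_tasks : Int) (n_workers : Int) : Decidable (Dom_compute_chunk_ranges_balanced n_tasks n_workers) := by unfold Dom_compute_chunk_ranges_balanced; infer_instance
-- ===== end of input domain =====

-- B replaces A's running-sum accumulator loop with a stateless closed form per index (objective: simpler).

-- ===== PORT A =====
-- literal transliteration: divmod, then a loop over range(1, n_workers+1) threading (chunk_ranges, stop)
def compute_chunk_ranges_balanced (n_tasks : Int) (n_workers : Int) : List (Int × Int) :=
  match PySem.Int.divmod? n_tasks n_workers with
  | none => []   -- Python raises ZeroDivisionError here; excluded by Pre_
  | some (q, r) =>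
    let st := (PySem.List.pyRange 1 (n_workers + 1) 1).foldl
      (fun (acc : List (Int × Int) × Int) i =>
        let start := acc.2
        let stop := acc.2 + (if i ≤ r then q + 1 else q)
        (acc.1 ++ [(start, stop)], stop)) ([], 0)
    st.1

-- ===== PORT B =====
-- literal transliteration of Source B: divmod, then a comprehension over range(n_workers)
def compute_chunk_ranges_balanced_alt (n_tasks : Int) (n_workers : Int) : List (Int × Int) :=
  match PySem.Int.divmod? n_tasks n_workers with
  | none => []   -- Python raises ZeroDivisionError here; excluded by Pre_
  | some (q, r) =>
    (PySem.List.pyRange 0 n_workers 1).map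
      (fun i => (i * q + min i r, (i + 1) * q + min (i + 1) r))

-- ===== PRECONDITION & SPEC =====
-- Pre_ excludes exactly n_workers = 0, where Python's divmod raises ZeroDivisionError.
def Pre_compute_chunk_ranges_balanced (n_tasks : Int) (n_workers : Int) : Prop := n_workers ≠ 0
instance (n_tasks : Int) (n_workers : Int) : Decidable (Pre_compute_chunk_ranges_balanced n_tasks n_workers) := by unfold Pre_compute_chunk_ranges_balanced; infer_instance
def pvWitness_compute_chunk_ranges_balanced : Int × Int := (10, 3)

def Spec_compute_chunk_ranges_balanced (n_tasks : Int) (n_workers : Int) (out : List (Int × Int)) : Prop := out = compute_chunk_ranges_balanced_alt n_tasks n_workers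
instance (n_tasks : Int) (n_workers : Int) (out : List (Int × Int)) : Decidable (Spec_compute_chunk_ranges_balanced n_tasks n_workers out) := by unfold Spec_compute_chunk_ranges_balanced; infer_instance

-- ===== CLAIM (what is proved, stated in full; the proofs are below) =====
def Claim_equal_compute_chunk_ranges_balanced : Prop := ∀ (n_tasks : Int) (n_workers : Int), Dom_compute_chunk_ranges_balanced n_tasks n_workers → Pre_compute_chunk_ranges_balanced n_tasks n_workers → Spec_compute_chunk_ranges_balanced n_tasks n_workers (compute_chunk_ranges_balanced n_tasks n_workers)

-- ===== LEMMAS AND PROOFS =====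

-- invariant of A's loop: after the first n iterations the stop accumulator is n*q + min n r
-- and the collected list is exactly B's closed form on range(0, n).
lemma chunk_fold_invariant (q r : Int) (hr : 0 ≤ r) : ∀ (n : Nat),
    (PySem.List.pyRange 1 ((n : Int) + 1) 1).foldl
      (fun (acc : List (Int × Int) × Int) i =>
        let start := acc.2
        let stop := acc.2 + (if i ≤ r then q + 1 else q)
        (acc.1 ++ [(start, stop)], stop)) ([], 0)
    = ((PySem.List.pyRange 0 (n : Int) 1).map
        (fun i => (i * q + min i r, (i + 1) * q + min (i + 1) r)),
       (n : Int) * q + min (n : Int) r) := by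
  intro n
  induction n with
  | zero =>
    simp [PySem.List.pyRange_one_eq_nil (by omega : (0:Int) ≤ 0)]
    omega
  | succ n ih =>
    have h1 : PySem.List.pyRange 1 ((n + 1 : Nat) : Int) 1 ++ [((n : Int) + 1) - 1 + 1] =
        PySem.List.pyRange 1 (((n + 1 : Nat) : Int) + 1) 1 := by
      push_cast
      rw [PySem.List.pyRange_one_succ_right (by omega : (1:Int) ≤ (n : Int) + 1)]
      norm_num
    rw [← h1, List.foldl_append]
    have hcast : ((n + 1 : Nat) : Int) = (n : Int) + 1 := by push_cast; ring
    rw [hcast]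
    rw [ih]
    have h2 : PySem.List.pyRange 0 ((n : Int) + 1) 1 =
        PySem.List.pyRange 0 (n : Int) 1 ++ [(n : Int)] :=
      PySem.List.pyRange_one_succ_right (by omega : (0:Int) ≤ (n : Int))
    simp only [List.foldl_cons, List.foldl_nil, h2, List.map_append, List.map_cons,
      List.map_nil, Prod.mk.injEq]
    have hq : ((n : Int) + 1) * q = (n : Int) * q + q := by ring
    refine ⟨?_, ?_⟩
    · congr 1
      simp only [List.cons.injEq, and_true, Prod.mk.injEq]
      refine ⟨trivial, ?_⟩
      rcases le_or_gt ((n : Int) + 1) r with h | h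
      · rw [if_pos (by omega), hq]; simp only [min_def]; split_ifs <;> omega
      · rw [if_neg (by omega), hq]; simp only [min_def]; split_ifs <;> omega
    · rcases le_or_gt ((n : Int) + 1) r with h | h
      · rw [if_pos (by omega), hq]; simp only [min_def]; split_ifs <;> omega
      · rw [if_neg (by omega), hq]; simp only [min_def]; split_ifs <;> omega

-- ===== VERDICT (by name: the statement is the Claim_ definition above) =====
theorem compute_chunk_ranges_balanced_spec : Claim_equal_compute_chunk_ranges_balanced := by
  intro n_tasks n_workers _ hpre
  unfold Pre_compute_chunk_ranges_balanced at hpre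
  unfold Spec_compute_chunk_ranges_balanced
  unfold compute_chunk_ranges_balanced compute_chunk_ranges_balanced_alt
  have hdm : PySem.Int.divmod? n_tasks n_workers =
      some (PySem.Int.floordiv n_tasks n_workers, PySem.Int.mod n_tasks n_workers) := by
    simp [PySem.Int.divmod?, PySem.Int.floordiv, PySem.Int.mod]
    exact hpre
  rw [hdm]
  rcases lt_trichotomy n_workers 0 with hneg | hzero | hpos
  · -- n_workers < 0 : both ranges are empty
    simp [PySem.List.pyRange_one_eq_nil (by omega : n_workers + 1 ≤ 1),
          PySem.List.pyRange_one_eq_nil (by omega : n_workers ≤ 0)]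
  · exact absurd hzero hpre
  · -- n_workers ≥ 1 : use the loop invariant with n = n_workers.toNat
    have hr : 0 ≤ PySem.Int.mod n_tasks n_workers := PySem.Int.mod_nonneg _ hpos
    have hn : ((n_workers.toNat : Nat) : Int) = n_workers := Int.toNat_of_nonneg (by omega)
    have := chunk_fold_invariant (PySem.Int.floordiv n_tasks n_workers)
      (PySem.Int.mod n_tasks n_workers) hr n_workers.toNat
    rw [hn] at this
    simp only [this]
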